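-- pv_equiv track=rewrite | github.com/yassinehemissi/H12-AI-Healing-GABES-2026 | backend/features/audit/game_theory_agent.py | _classify_stakeholder
-- ===== SOURCE A (Python) =====
-- def _classify_stakeholder(name: str) -> str:
--     """Classify stakeholder type based on name"""
--     name_lower = name.lower()
--
--     if any(
--         term in name_lower
--         for term in ["government", "ministry", "governorate", "authority"]
--     ):
--         return "government"
--     elif any(
--         term in name_lower
--         for term in ["community", "local", "residents", "citizens"]
--     ):
--         return "local_community"
--     elif any(
--         term in name_lower
--         for term in ["industry", "company", "factory", "industrial"]
--     ):
--         return "industry"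
--     elif any(
--         term in name_lower
--         for term in ["ngo", "association", "environmental", "green"]
--     ):
--         return "environmental_ngos"
--     elif any(
--         term in name_lower for term in ["investor", "funding", "bank", "finance"]
--     ):
--         return "investors"
--     elif any(
--         term in name_lower
--         for term in ["expert", "consultant", "technical", "engineer"]
--     ):
--         return "technical_experts"
--
--     return "other"
-- ===== SOURCE B (Python) =====
-- _LABELS = [
--     "government",
--     "local_community",
--     "industry",
--     "environmental_ngos",
--     "investors",
--     "technical_experts",
-- ]
--
-- # every keyword mapped to the index of its category in _LABELS
-- _TERM_CAT = {
--     "government": 0, "ministry": 0, "governorate": 0, "authority": 0,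
--     "community": 1, "local": 1, "residents": 1, "citizens": 1,
--     "industry": 2, "company": 2, "factory": 2, "industrial": 2,
--     "ngo": 3, "association": 3, "environmental": 3, "green": 3,
--     "investor": 4, "funding": 4, "bank": 4, "finance": 4,
--     "expert": 5, "consultant": 5, "technical": 5, "engineer": 5,
-- }
--
-- _LENS = sorted({len(t) for t in _TERM_CAT})
--
--
-- def _classify_stakeholder(name: str) -> str:
--     """Classify stakeholder type based on name.
--
--     Single sliding-window pass over the lowered name: every window whose
--     text is a keyword is found by one dict lookup, and the best (lowest)
--     category index seen anywhere wins -- which is exactly the first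
--     category of A's priority chain that has a matching keyword.
--     """
--     low = name.lower()
--     best = len(_LABELS)
--     for i in range(len(low)):
--         for L in _LENS:
--             cat = _TERM_CAT.get(low[i:i + L])
--             if cat is not None and cat < best:
--                 best = cat
--     return _LABELS[best] if best < len(_LABELS) else "other"
-- ===== Notes on version B (the rewrite author's own statement) =====
-- stated objective: alternative
-- what changed: Replaces the 24 independent substring searches of the if/elif chain by a single sliding-window scan of the lowered name that looks each window up in a keyword-to-category-index dict and keeps the minimum category index, which equals the first matching branch of A's priority chain.
import Mathlib
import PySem

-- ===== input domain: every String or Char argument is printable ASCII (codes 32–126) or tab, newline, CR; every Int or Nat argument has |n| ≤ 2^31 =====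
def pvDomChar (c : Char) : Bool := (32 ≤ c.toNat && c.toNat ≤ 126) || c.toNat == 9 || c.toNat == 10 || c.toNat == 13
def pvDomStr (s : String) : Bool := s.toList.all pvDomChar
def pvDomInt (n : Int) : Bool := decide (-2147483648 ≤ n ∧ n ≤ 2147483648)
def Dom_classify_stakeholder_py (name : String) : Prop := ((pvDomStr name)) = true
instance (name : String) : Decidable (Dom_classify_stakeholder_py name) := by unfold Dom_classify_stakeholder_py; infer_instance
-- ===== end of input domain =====

-- B replaces A's 24 independent substring searches by one sliding-window scan of the lowered name
-- with a keyword→category-index dict, keeping the minimum category index (objective: alternative).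

-- ===== PORT A =====
-- literal transliteration of the if/elif chain; 'any(term in name_lower for term in [...])' = List.any with PySem.Str.isIn
def classify_stakeholder_py (name : String) : String :=
  let name_lower := PySem.Str.lower name
  if ["government", "ministry", "governorate", "authority"].any (fun t => PySem.Str.isIn t name_lower) then
    "government"
  else if ["community", "local", "residents", "citizens"].any (fun t => PySem.Str.isIn t name_lower) then
    "local_community"
  else if ["industry", "company", "factory", "industrial"].any (fun t => PySem.Str.isIn t name_lower) then
    "industry"
  else if ["ngo", "association", "environmental", "green"].any (fun t => PySem.Str.isIn t name_lower) then
    "environmental_ngos"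
  else if ["investor", "funding", "bank", "finance"].any (fun t => PySem.Str.isIn t name_lower) then
    "investors"
  else if ["expert", "consultant", "technical", "engineer"].any (fun t => PySem.Str.isIn t name_lower) then
    "technical_experts"
  else
    "other"

-- ===== PORT B =====
-- _LABELS
def pvLabels : List String :=
  ["government", "local_community", "industry", "environmental_ngos", "investors", "technical_experts"]

-- the items of the _TERM_CAT dict literal, in order (keys as char lists: strings are sliced as code points)
def pvTable : List (List Char × Int) :=
  [("government".toList, 0), ("ministry".toList, 0), ("governorate".toList, 0), ("authority".toList, 0),
   ("community".toList, 1), ("local".toList, 1), ("residents".toList, 1), ("citizens".toList, 1),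
   ("industry".toList, 2), ("company".toList, 2), ("factory".toList, 2), ("industrial".toList, 2),
   ("ngo".toList, 3), ("association".toList, 3), ("environmental".toList, 3), ("green".toList, 3),
   ("investor".toList, 4), ("funding".toList, 4), ("bank".toList, 4), ("finance".toList, 4),
   ("expert".toList, 5), ("consultant".toList, 5), ("technical".toList, 5), ("engineer".toList, 5)]

-- _TERM_CAT
def pvTermCat : PySem.Dict (List Char) Int := PySem.Dict.ofList pvTable

-- _LENS = sorted({len(t) for t in _TERM_CAT})
def pvLens : List Int :=
  PySem.List.sorted (PySem.Set.ofList (pvTable.map (fun p => (p.1.length : Int)))) id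

-- _TERM_CAT.get(low[i:i+L])
def pvCheck (cs : List Char) (i L : Int) : Option Int :=
  pvTermCat.get? (PySem.List.slice cs (some i) (some (i + L)))

-- 'if cat is not None and cat < best: best = cat'
def pvScanBody (cs : List Char) (b : Int) (p : Int × Int) : Int :=
  match pvCheck cs p.1 p.2 with
  | some c => if c < b then c else b
  | none => b

-- inner 'for L in _LENS' loop
def pvInner (cs : List Char) (b : Int) (i : Int) : Int :=
  pvLens.foldl (fun b' L => pvScanBody cs b' (i, L)) b

def classify_stakeholder_py_alt (name : String) : String :=
  let low := (PySem.Str.lower name).toList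
  let best := (PySem.List.pyRange 0 (low.length : Int) 1).foldl (pvInner low) 6
  if best < 6 then PySem.List.pyGetD pvLabels best "other" else "other"

-- ===== PRECONDITION & SPEC =====
def Spec_classify_stakeholder_py (name : String) (out : String) : Prop := out = classify_stakeholder_py_alt name
instance (name : String) (out : String) : Decidable (Spec_classify_stakeholder_py name out) := by unfold Spec_classify_stakeholder_py; infer_instance

-- ===== CLAIM (what is proved, stated in full; the proofs are below) =====
def Claim_equal_classify_stakeholder_py : Prop := ∀ (name : String), Dom_classify_stakeholder_py name → Spec_classify_stakeholder_py name (classify_stakeholder_py name)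

-- ===== LEMMAS AND PROOFS =====

-- all (i, L) window descriptors the scan visits
def pvPairs (cs : List Char) : List (Int × Int) :=
  (PySem.List.pyRange 0 (cs.length : Int) 1).flatMap (fun i => pvLens.map (fun L => (i, L)))

-- a nested foldl is the foldl over the flattened pair list
theorem pvFoldFlatten {α β : Type} (f : Int → α × β → Int) (l1 : List α) (l2 : List β) (b0 : Int) :
    l1.foldl (fun b i => l2.foldl (fun b' L => f b' (i, L)) b) b0
      = (l1.flatMap (fun i => l2.map (fun L => (i, L)))).foldl f b0 := by
  induction l1 generalizing b0 with
  | nil => rfl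
  | cons x xs ih =>
    simp only [List.foldl_cons, List.flatMap_cons, List.foldl_append, List.foldl_map]
    exact ih _

theorem pvScanBody_le (cs : List Char) (b : Int) (p : Int × Int) : pvScanBody cs b p ≤ b := by
  unfold pvScanBody
  cases pvCheck cs p.1 p.2 with
  | none => exact le_refl b
  | some c => dsimp only; split <;> omega

theorem pvScanBody_le_hit (cs : List Char) (b : Int) (p : Int × Int) (c : Int)
    (hc : pvCheck cs p.1 p.2 = some c) : pvScanBody cs b p ≤ c := by
  unfold pvScanBody
  rw [hc]; dsimp only; split <;> omega

theorem pvScanBody_cases (cs : List Char) (b : Int) (p : Int × Int) :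
    pvScanBody cs b p = b ∨ pvCheck cs p.1 p.2 = some (pvScanBody cs b p) := by
  unfold pvScanBody
  cases h : pvCheck cs p.1 p.2 with
  | none => exact Or.inl rfl
  | some c => dsimp only; split
              · exact Or.inr rfl
              · exact Or.inl rfl

theorem pvFold_le_init (cs : List Char) (l : List (Int × Int)) (b0 : Int) :
    l.foldl (pvScanBody cs) b0 ≤ b0 := by
  induction l generalizing b0 with
  | nil => exact le_refl b0
  | cons x xs ih => exact le_trans (ih _) (pvScanBody_le cs b0 x)

theorem pvFold_le_hit (cs : List Char) (l : List (Int × Int)) (b0 : Int) (p : Int × Int) (c : Int)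
    (hp : p ∈ l) (hc : pvCheck cs p.1 p.2 = some c) : l.foldl (pvScanBody cs) b0 ≤ c := by
  induction l generalizing b0 with
  | nil => cases hp
  | cons x xs ih =>
    rcases List.mem_cons.mp hp with h | h
    · subst h
      exact le_trans (pvFold_le_init cs xs _) (pvScanBody_le_hit cs b0 p c hc)
    · exact ih _ h

theorem pvFold_cases (cs : List Char) (l : List (Int × Int)) (b0 : Int) :
    l.foldl (pvScanBody cs) b0 = b0 ∨
      ∃ p ∈ l, pvCheck cs p.1 p.2 = some (l.foldl (pvScanBody cs) b0) := by
  induction l generalizing b0 with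
  | nil => exact Or.inl rfl
  | cons x xs ih =>
    rw [List.foldl_cons]
    rcases ih (pvScanBody cs b0 x) with h | ⟨p, hp, hc⟩
    · rw [h]
      rcases pvScanBody_cases cs b0 x with h2 | h2
      · exact Or.inl h2
      · exact Or.inr ⟨x, List.mem_cons_self, h2⟩
    · exact Or.inr ⟨p, List.mem_cons_of_mem x hp, hc⟩

-- table facts, checked by computation
theorem pvTable_items : pvTermCat.items = pvTable := by decide
theorem pvTable_nodup : pvTermCat.keys.Nodup := by decide
theorem pvTable_vals : ∀ p ∈ pvTable, 0 ≤ p.2 ∧ p.2 < 6 := by decide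
theorem pvTable_len_mem : ∀ p ∈ pvTable, (p.1.length : Int) ∈ pvLens := by decide
theorem pvTable_ne_nil : ∀ p ∈ pvTable, p.1 ≠ [] := by decide
theorem pvLens_pos : ∀ L ∈ pvLens, 0 < L := by decide

-- every window hit is a real occurrence, and conversely
theorem pvHit_iff (cs : List Char) (c : Int) :
    (∃ p ∈ pvPairs cs, pvCheck cs p.1 p.2 = some c) ↔
      ∃ t, (t, c) ∈ pvTable ∧ PySem.Chars.isIn t cs = true := by
  constructor
  · rintro ⟨p, hp, hc⟩
    rcases List.mem_flatMap.mp hp with ⟨i, hi, hpL⟩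
    rcases List.mem_map.mp hpL with ⟨L, hL, hpeq⟩
    subst hpeq
    have hmem : (PySem.List.slice cs (some i) (some (i + L)), c) ∈ pvTable := by
      rw [← pvTable_items]
      unfold pvCheck at hc
      exact PySem.Dict.mem_items_of_get?_eq_some pvTermCat hc
    refine ⟨_, hmem, ?_⟩
    rw [PySem.Chars.isIn_iff_infix]
    have h0i : 0 ≤ i := (PySem.List.mem_pyRange_one.mp hi).1
    have h0L : 0 < L := pvLens_pos L hL
    rw [PySem.List.slice_toNat cs h0i (by omega)]
    exact ((cs.drop i.toNat).take_prefix _).isInfix.trans (cs.drop_suffix i.toNat).isInfix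
  · rintro ⟨t, ht, hin⟩
    rw [PySem.Chars.isIn_iff_infix] at hin
    rcases hin with ⟨pre, suf, heq⟩
    have hpref : t <+: cs.drop pre.length := by
      rw [← heq, List.append_assoc, List.drop_left]
      exact ⟨suf, rfl⟩
    have hlt : pre.length < cs.length := by
      have hne : cs.drop pre.length ≠ [] := by
        intro h0
        exact pvTable_ne_nil (t, c) ht (List.prefix_nil.mp (h0 ▸ hpref))
      have := List.length_pos_of_ne_nil hne
      rw [List.length_drop] at this
      omega
    refine ⟨((pre.length : Int), (t.length : Int)), ?_, ?_⟩
    · exact List.mem_flatMap.mpr ⟨(pre.length : Int),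
        PySem.List.mem_pyRange_one.mpr ⟨by positivity, by exact_mod_cast hlt⟩,
        List.mem_map.mpr ⟨(t.length : Int), pvTable_len_mem (t, c) ht, rfl⟩⟩
    · unfold pvCheck
      have hslice : PySem.List.slice cs (some (pre.length : Int))
          (some ((pre.length : Int) + (t.length : Int))) = t := by
        rw [PySem.List.slice_natCast_add]
        exact (List.prefix_iff_eq_take.mp hpref).symm
      rw [hslice]
      have := PySem.Dict.get?_of_mem_items (d := pvTermCat) (pvTable_items ▸ ht) pvTable_nodup
      exact this

-- a hit of category c exists iff some keyword of category c occurs (stated per category below)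
theorem pvCat_hit (cs : List Char) (c : Int) (terms : List String)
    (hfwd : ∀ p ∈ pvTable, p.2 = c → p.1 ∈ terms.map String.toList)
    (hbwd : ∀ t ∈ terms.map String.toList, (t, c) ∈ pvTable) :
    (∃ p ∈ pvPairs cs, pvCheck cs p.1 p.2 = some c) ↔
      terms.any (fun t => PySem.Chars.isIn t.toList cs) = true := by
  rw [pvHit_iff, List.any_eq_true]
  constructor
  · rintro ⟨t, ht, hin⟩
    rcases List.mem_map.mp (hfwd (t, c) ht rfl) with ⟨s, hs, hst⟩
    exact ⟨s, hs, hst ▸ hin⟩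
  · rintro ⟨s, hs, hin⟩
    exact ⟨s.toList, hbwd s.toList (List.mem_map_of_mem hs), hin⟩

-- ===== VERDICT (by name: the statement is the Claim_ definition above) =====
theorem classify_stakeholder_py_spec : Claim_equal_classify_stakeholder_py := by
  intro name _
  unfold Spec_classify_stakeholder_py
  unfold classify_stakeholder_py classify_stakeholder_py_alt
  simp only [PySem.Str.isIn_eq, PySem.Str.toList_lower]
  set cs : List Char := PySem.Chars.lower name.toList with hcs
  -- B's best value as a fold over the flattened pair list
  have hflat : (PySem.List.pyRange 0 (cs.length : Int) 1).foldl (pvInner cs) 6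
      = (pvPairs cs).foldl (pvScanBody cs) 6 := by
    unfold pvInner pvPairs
    exact pvFoldFlatten (pvScanBody cs) _ pvLens 6
  rw [hflat]
  set best := (pvPairs cs).foldl (pvScanBody cs) 6 with hbest
  -- helper facts about best
  have hub : ∀ c t, (t, c) ∈ pvTable → PySem.Chars.isIn t cs = true → best ≤ c := by
    intro c t ht hin
    rcases (pvHit_iff cs c).mpr ⟨t, ht, hin⟩ with ⟨p, hp, hc⟩
    exact pvFold_le_hit cs _ 6 p c hp hc
  have hcases : best = 6 ∨ ∃ t, (t, best) ∈ pvTable ∧ PySem.Chars.isIn t cs = true := by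
    rcases pvFold_cases cs (pvPairs cs) 6 with h | ⟨p, hp, hc⟩
    · exact Or.inl h
    · exact Or.inr ((pvHit_iff cs best).mp ⟨p, hp, hc⟩)
  have hnn : 0 ≤ best := by
    rcases hcases with h | ⟨t, ht, _⟩
    · omega
    · exact (pvTable_vals (t, best) ht).1
  -- the six category equivalences
  have h0 := pvCat_hit cs 0 ["government", "ministry", "governorate", "authority"]
      (by decide) (by decide)
  have h1 := pvCat_hit cs 1 ["community", "local", "residents", "citizens"]
      (by decide) (by decide)
  have h2 := pvCat_hit cs 2 ["industry", "company", "factory", "industrial"]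
      (by decide) (by decide)
  have h3 := pvCat_hit cs 3 ["ngo", "association", "environmental", "green"]
      (by decide) (by decide)
  have h4 := pvCat_hit cs 4 ["investor", "funding", "bank", "finance"]
      (by decide) (by decide)
  have h5 := pvCat_hit cs 5 ["expert", "consultant", "technical", "engineer"]
      (by decide) (by decide)
  -- if no keyword of category c occurs, best cannot be c
  have hne : ∀ c : Int, c < 6 → ¬ (∃ p ∈ pvPairs cs, pvCheck cs p.1 p.2 = some c) → best ≠ c := by
    intro c hc6 hno hbc
    rcases hcases with h6 | ⟨t, ht, hin⟩
    · omega
    · exact hno ((pvHit_iff cs c).mpr ⟨t, hbc ▸ ht, hin⟩)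
  have hrange : best = 6 ∨ (0 ≤ best ∧ best < 6) := by
    rcases hcases with h | ⟨t, ht, _⟩
    · exact Or.inl h
    · exact Or.inr (pvTable_vals (t, best) ht)
  by_cases hb0 : (["government", "ministry", "governorate", "authority"].any
      (fun t => PySem.Chars.isIn t.toList cs)) = true
  · have hle : best ≤ 0 := by
      rcases h0.mpr hb0 with ⟨p, hp, hc⟩
      exact pvFold_le_hit cs _ 6 p 0 hp hc
    have hbeq : best = 0 := by omega
    rw [if_pos hb0, hbeq]
    decide
  · have hne0 : best ≠ 0 := hne 0 (by omega) (fun hex => hb0 (h0.mp hex))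
    rw [if_neg hb0]
    by_cases hb1 : (["community", "local", "residents", "citizens"].any
        (fun t => PySem.Chars.isIn t.toList cs)) = true
    · have hle : best ≤ 1 := by
        rcases h1.mpr hb1 with ⟨p, hp, hc⟩
        exact pvFold_le_hit cs _ 6 p 1 hp hc
      have hbeq : best = 1 := by omega
      rw [if_pos hb1, hbeq]
      decide
    · have hne1 : best ≠ 1 := hne 1 (by omega) (fun hex => hb1 (h1.mp hex))
      rw [if_neg hb1]
      by_cases hb2 : (["industry", "company", "factory", "industrial"].any
          (fun t => PySem.Chars.isIn t.toList cs)) = true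
      · have hle : best ≤ 2 := by
          rcases h2.mpr hb2 with ⟨p, hp, hc⟩
          exact pvFold_le_hit cs _ 6 p 2 hp hc
        have hbeq : best = 2 := by omega
        rw [if_pos hb2, hbeq]
        decide
      · have hne2 : best ≠ 2 := hne 2 (by omega) (fun hex => hb2 (h2.mp hex))
        rw [if_neg hb2]
        by_cases hb3 : (["ngo", "association", "environmental", "green"].any
            (fun t => PySem.Chars.isIn t.toList cs)) = true
        · have hle : best ≤ 3 := by
            rcases h3.mpr hb3 with ⟨p, hp, hc⟩
            exact pvFold_le_hit cs _ 6 p 3 hp hc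
          have hbeq : best = 3 := by omega
          rw [if_pos hb3, hbeq]
          decide
        · have hne3 : best ≠ 3 := hne 3 (by omega) (fun hex => hb3 (h3.mp hex))
          rw [if_neg hb3]
          by_cases hb4 : (["investor", "funding", "bank", "finance"].any
              (fun t => PySem.Chars.isIn t.toList cs)) = true
          · have hle : best ≤ 4 := by
              rcases h4.mpr hb4 with ⟨p, hp, hc⟩
              exact pvFold_le_hit cs _ 6 p 4 hp hc
            have hbeq : best = 4 := by omega
            rw [if_pos hb4, hbeq]
            decide
          · have hne4 : best ≠ 4 := hne 4 (by omega) (fun hex => hb4 (h4.mp hex))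
            rw [if_neg hb4]
            by_cases hb5 : (["expert", "consultant", "technical", "engineer"].any
                (fun t => PySem.Chars.isIn t.toList cs)) = true
            · have hle : best ≤ 5 := by
                rcases h5.mpr hb5 with ⟨p, hp, hc⟩
                exact pvFold_le_hit cs _ 6 p 5 hp hc
              have hbeq : best = 5 := by omega
              rw [if_pos hb5, hbeq]
              decide
            · have hne5 : best ≠ 5 := hne 5 (by omega) (fun hex => hb5 (h5.mp hex))
              rw [if_neg hb5]
              have hbeq : best = 6 := by omega
              rw [hbeq]
              decide
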